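-- pv_equiv track=rewrite | github.com/pushpa-info-14/python-programming | LeetCode/3000-3500/Q3142 Check if Grid Satisfies Conditions.py | satisfiesConditions
-- ===== SOURCE A (Python) =====
-- from typing import List
--
-- def satisfiesConditions(grid: List[List[int]]) -> bool:
--     m = len(grid)
--     n = len(grid[0])
--     for r in range(m):
--         for c in range(n):
--             if c > 0:
--                 if grid[r][c - 1] == grid[r][c]:
--                     return False
--             if r > 0:
--                 if grid[r - 1][c] != grid[r][c]:
--                     return False
--     return True
-- ===== SOURCE B (Python) =====
-- from typing import List
--
-- def satisfiesConditions(grid: List[List[int]]) -> bool: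
--     first = grid[0]
--     n = len(first)
--     if any(row[:n] != first for row in grid):
--         return False
--     return all(x != y for x, y in zip(first, first[1:]))
-- ===== Notes on version B (the rewrite author's own statement) =====
-- stated objective: simpler
-- what changed: Replaces the per-cell nested index scan by two whole-row passes: every row's first-n-column prefix must equal grid[0] (covers the vertical condition), and adjacent entries of grid[0] must differ, checked via zip of the first row with its own tail.
-- outside the precondition, e.g. on satisfiesConditions([[1, 1], [0]]): A returns False, B returns False; on satisfiesConditions([[0, 1], [0]]): A raises IndexError, B returns False; on satisfiesConditions([]): A raises IndexError, B raises IndexError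
import Mathlib
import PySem

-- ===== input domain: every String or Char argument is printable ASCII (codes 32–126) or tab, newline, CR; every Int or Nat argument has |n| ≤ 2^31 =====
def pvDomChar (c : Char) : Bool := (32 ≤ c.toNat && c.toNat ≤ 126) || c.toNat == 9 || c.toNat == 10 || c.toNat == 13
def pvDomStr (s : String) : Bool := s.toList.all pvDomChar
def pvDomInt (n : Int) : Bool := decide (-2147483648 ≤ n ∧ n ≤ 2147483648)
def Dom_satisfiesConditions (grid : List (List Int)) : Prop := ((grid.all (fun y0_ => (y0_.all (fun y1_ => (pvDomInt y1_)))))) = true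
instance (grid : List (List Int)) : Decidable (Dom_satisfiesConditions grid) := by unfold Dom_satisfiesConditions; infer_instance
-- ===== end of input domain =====

-- B checks "every row's first-n-column prefix equals grid[0]" and "grid[0] has no equal adjacent
-- pair" instead of A's per-cell neighbour scan; claimed for nonempty grids with no row shorter than grid[0].

-- ===== PORT A =====
-- grid[r][c] with Python indexing; the .getD defaults are never reached inside Pre_
def aGet (grid : List (List Int)) (r c : Int) : Int :=
  (PySem.List.pyGet? ((PySem.List.pyGet? grid r).getD []) c).getD 0

def satisfiesConditions (grid : List (List Int)) : Bool :=
  (PySem.List.pyRange 0 (grid.length : Int) 1).all fun r =>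
    (PySem.List.pyRange 0 (((PySem.List.pyGet? grid 0).getD []).length : Int) 1).all fun c =>
      (!(decide (0 < c) && decide (aGet grid r (c-1) = aGet grid r c))) &&
      (!(decide (0 < r) && decide (aGet grid (r-1) c ≠ aGet grid r c)))

-- ===== PORT B =====
def satisfiesConditions_alt (grid : List (List Int)) : Bool :=
  let first := (PySem.List.pyGet? grid 0).getD []
  if grid.any (fun row => PySem.List.slice row none (some (first.length : Int)) ≠ first) then false
  else (first.zip (PySem.List.slice first (some 1) none)).all fun p => decide (p.1 ≠ p.2)

-- ===== PRECONDITION & SPEC =====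
-- Pre_ excludes the empty grid, on which A raises IndexError, and grids with a row shorter than
-- grid[0], on which A raises IndexError at the first missing cell unless an earlier cell already
-- violated a condition (then both programs return False); rows longer than grid[0] stay inside,
-- since A only ever reads the first len(grid[0]) columns.
def Pre_satisfiesConditions (grid : List (List Int)) : Prop :=
  grid ≠ [] ∧ ∀ row ∈ grid, (grid.headD []).length ≤ row.length
instance (grid : List (List Int)) : Decidable (Pre_satisfiesConditions grid) := by
  unfold Pre_satisfiesConditions; infer_instance
def pvWitness_satisfiesConditions : List (List Int) := [[1, 2], [1, 2]]

def Spec_satisfiesConditions (grid : List (List Int)) (out : Bool) : Prop := out = satisfiesConditions_alt grid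
instance (grid : List (List Int)) (out : Bool) : Decidable (Spec_satisfiesConditions grid out) := by unfold Spec_satisfiesConditions; infer_instance

-- ===== CLAIM (what is proved, stated in full; the proofs are below) =====
def Claim_equal_satisfiesConditions : Prop := ∀ (grid : List (List Int)), Dom_satisfiesConditions grid → Pre_satisfiesConditions grid → Spec_satisfiesConditions grid (satisfiesConditions grid)

-- ===== LEMMAS AND PROOFS =====

-- cell (r, c) as the proofs read it (Nat indices)
def gAt (grid : List (List Int)) (r c : Nat) : Int := ((grid.getD r []).getD c 0)

theorem aGet_nat (grid : List (List Int)) (r c : Nat) :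
    aGet grid (r : Int) (c : Int) = gAt grid r c := by
  simp [aGet, gAt, PySem.List.pyGet?_natCast, List.getD_eq_getElem?_getD]

theorem A_char (grid : List (List Int)) :
    satisfiesConditions grid = true ↔
      ∀ r < grid.length, ∀ c < ((PySem.List.pyGet? grid 0).getD []).length,
        (0 < c → gAt grid r (c-1) ≠ gAt grid r c) ∧
        (0 < r → gAt grid (r-1) c = gAt grid r c) := by
  simp only [satisfiesConditions]
  simp [PySem.List.pyRange_zero_natCast, List.all_eq_true]
  constructor
  · intro h r hr c hc
    obtain ⟨h1, h2⟩ := h r hr c hc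
    refine ⟨?_, ?_⟩
    · intro hc0
      rcases h1 with h1 | h1
      · omega
      · have e : ((c : Int) - 1) = ((c - 1 : Nat) : Int) := by omega
        rw [e, aGet_nat, aGet_nat] at h1
        exact h1
    · intro hr0
      rcases h2 with h2 | h2
      · omega
      · have e : ((r : Int) - 1) = ((r - 1 : Nat) : Int) := by omega
        rw [e, aGet_nat, aGet_nat] at h2
        exact h2
  · intro h r hr c hc
    obtain ⟨h1, h2⟩ := h r hr c hc
    refine ⟨?_, ?_⟩
    · by_cases hc0 : c = 0
      · left; exact hc0
      · right
        have e : ((c : Int) - 1) = ((c - 1 : Nat) : Int) := by omega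
        rw [e, aGet_nat, aGet_nat]
        exact h1 (by omega)
    · by_cases hr0 : r = 0
      · left; exact hr0
      · right
        have e : ((r : Int) - 1) = ((r - 1 : Nat) : Int) := by omega
        rw [e, aGet_nat, aGet_nat]
        exact h2 (by omega)

theorem take_eq_iff_pointwise (row g0 : List Int) (hlen : g0.length ≤ row.length) :
    row.take g0.length = g0 ↔ ∀ c < g0.length, row.getD c 0 = g0.getD c 0 := by
  constructor
  · intro h c hc
    rw [List.getD_eq_getElem _ _ (by omega : c < row.length), List.getD_eq_getElem _ _ hc]
    rw [List.getElem_of_eq h.symm hc]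
    simp
  · intro h
    apply List.ext_getElem
    · simp; omega
    · intro i h1 h2
      simp only [List.getElem_take]
      have := h i h2
      rwa [List.getD_eq_getElem _ _ (by omega), List.getD_eq_getElem _ _ h2] at this

theorem B_char (grid : List (List Int)) :
    satisfiesConditions_alt grid = true ↔
      (∀ row ∈ grid, row.take ((PySem.List.pyGet? grid 0).getD []).length = (PySem.List.pyGet? grid 0).getD []) ∧
      (∀ i, i + 1 < ((PySem.List.pyGet? grid 0).getD []).length →
        ((PySem.List.pyGet? grid 0).getD []).getD i 0 ≠ ((PySem.List.pyGet? grid 0).getD []).getD (i+1) 0) := by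
  set first := (PySem.List.pyGet? grid 0).getD [] with hf
  simp only [satisfiesConditions_alt, ← hf, PySem.List.slice_from_one, PySem.List.slice_to_natCast]
  split_ifs with hany
  · simp only [false_iff]
    intro ⟨hrows, _⟩
    simp only [List.any_eq_true, decide_eq_true_eq] at hany
    obtain ⟨row, hm, hne⟩ := hany
    exact hne (hrows row hm)
  · simp only [List.any_eq_true, decide_eq_true_eq, not_exists, not_and, not_not] at hany
    simp only [List.all_eq_true, decide_eq_true_eq]
    constructor
    · intro h
      refine ⟨hany, ?_⟩
      intro i hi
      have hi' : i < (first.zip first.tail).length := by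
        simp [List.length_zip, List.length_tail]; omega
      have := h ((first.zip first.tail)[i]) (List.getElem_mem hi')
      rw [List.getElem_zip, List.getElem_tail] at this
      rwa [List.getD_eq_getElem _ _ (by omega), List.getD_eq_getElem _ _ hi]
    · rintro ⟨-, h⟩ p hp
      obtain ⟨i, hi, rfl⟩ := List.mem_iff_getElem.mp hp
      rw [List.getElem_zip, List.getElem_tail]
      have hlen : i + 1 < first.length := by
        simp [List.length_zip, List.length_tail] at hi; omega
      have := h i hlen
      rwa [List.getD_eq_getElem _ _ (by omega), List.getD_eq_getElem _ _ hlen] at this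

-- ===== VERDICT (by name: the statement is the Claim_ definition above) =====
theorem satisfiesConditions_spec : Claim_equal_satisfiesConditions := by
  intro grid _ hpre
  unfold Spec_satisfiesConditions
  rw [Bool.eq_iff_iff, A_char, B_char]
  obtain ⟨hne, hrect⟩ := hpre
  cases grid with
  | nil => exact absurd rfl hne
  | cons g0 rest =>
    have hf : (PySem.List.pyGet? (g0 :: rest) 0).getD [] = g0 := by
      rw [PySem.List.pyGet?_zero_cons]; rfl
    simp only [hf]
    have hhead : (g0 :: rest).headD [] = g0 := rfl
    simp only [hhead] at hrect
    constructor
    · intro H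
      have hrow : ∀ r, r < (g0 :: rest).length → ((g0 :: rest).getD r []).take g0.length = g0 := by
        intro r
        induction r with
        | zero => intro _; simp
        | succ k ih =>
          intro hr
          have hk : k < (g0 :: rest).length := by simp at hr ⊢; omega
          have ihk := ih hk
          have hmem : (g0 :: rest).getD (k+1) [] ∈ (g0 :: rest) := by
            rw [List.getD_eq_getElem _ _ hr]
            exact List.getElem_mem hr
          have hlen : g0.length ≤ ((g0 :: rest).getD (k+1) []).length := hrect _ hmem
          rw [take_eq_iff_pointwise _ _ hlen]
          intro c hc
          have hv := (H (k+1) hr c hc).2 (Nat.succ_pos k)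
          simp only [gAt, Nat.add_sub_cancel] at hv
          rw [← hv]
          have hmemk : (g0 :: rest).getD k [] ∈ (g0 :: rest) := by
            rw [List.getD_eq_getElem _ _ hk]
            exact List.getElem_mem hk
          exact (take_eq_iff_pointwise _ _ (hrect _ hmemk)).1 ihk c hc
      refine ⟨?_, ?_⟩
      · intro row hm
        obtain ⟨r, hr, rfl⟩ := List.mem_iff_getElem.mp hm
        have := hrow r hr
        rwa [List.getD_eq_getElem _ _ hr] at this
      · intro i hi
        have := (H 0 (by simp) (i+1) hi).1 (Nat.succ_pos i)
        simpa [gAt] using this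
    · rintro ⟨hrows, hpairs⟩ r hr c hc
      have hlr : g0.length ≤ ((g0 :: rest).getD r []).length := by
        rw [List.getD_eq_getElem _ _ hr]
        exact hrect _ (List.getElem_mem hr)
      have htake : ((g0 :: rest).getD r []).take g0.length = g0 := by
        rw [List.getD_eq_getElem _ _ hr]
        exact hrows _ (List.getElem_mem hr)
      have hpr := (take_eq_iff_pointwise _ _ hlr).1 htake
      have hr' : r - 1 < (g0 :: rest).length := by simp at hr ⊢; omega
      have hlr' : g0.length ≤ ((g0 :: rest).getD (r-1) []).length := by
        rw [List.getD_eq_getElem _ _ hr']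
        exact hrect _ (List.getElem_mem hr')
      have htake' : ((g0 :: rest).getD (r-1) []).take g0.length = g0 := by
        rw [List.getD_eq_getElem _ _ hr']
        exact hrows _ (List.getElem_mem hr')
      have hpr' := (take_eq_iff_pointwise _ _ hlr').1 htake'
      refine ⟨?_, ?_⟩
      · intro hc0
        have hp := hpairs (c-1) (by omega)
        have e : c - 1 + 1 = c := by omega
        rw [e] at hp
        simp only [gAt]
        rw [hpr c hc, hpr (c-1) (by omega)]
        exact hp
      · intro _
        simp only [gAt]
        rw [hpr c hc, hpr' c hc]
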